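-- pv_equiv track=rewrite | github.com/takuto-yoshida/at-coder-training | adt_easy_20250128_1/B-FirstABC.py | count_number
-- ===== SOURCE A (Python) =====
-- def count_number(target_string:str) -> int:
--
--     has_a = False
--     has_b = False
--     has_c = False
--
--     number = 0
--     for chr in target_string:
--         if chr == "A":
--             has_a = True
--         if chr == "B":
--             has_b = True
--         if chr == "C":
--             has_c = True
--
--         number = number + 1
--         if has_a & has_b & has_c:
--             break
--
--     return number
-- ===== SOURCE B (Python) =====
-- def count_number(target_string: str) -> int:
--     a = target_string.find("A")
--     b = target_string.find("B")
--     c = target_string.find("C")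
--     if a == -1 or b == -1 or c == -1:
--         return len(target_string)
--     return max(a, b, c) + 1
-- ===== Notes on version B (the rewrite author's own statement) =====
-- stated objective: idiomatic
-- what changed: Replaces the flag-maintaining character loop with three independent str.find index searches combined by max (falling back to len when a letter is missing).
import Mathlib
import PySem

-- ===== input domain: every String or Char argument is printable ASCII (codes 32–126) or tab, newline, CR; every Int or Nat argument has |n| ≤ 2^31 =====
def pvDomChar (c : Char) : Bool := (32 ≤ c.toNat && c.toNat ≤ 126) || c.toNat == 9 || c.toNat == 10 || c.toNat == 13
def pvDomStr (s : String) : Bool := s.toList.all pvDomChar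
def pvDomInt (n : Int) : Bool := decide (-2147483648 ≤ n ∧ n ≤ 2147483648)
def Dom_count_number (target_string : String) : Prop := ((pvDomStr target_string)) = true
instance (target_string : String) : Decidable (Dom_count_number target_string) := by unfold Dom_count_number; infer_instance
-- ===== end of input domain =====

-- B replaces A's flag-maintaining scan with three independent str.find index searches combined by max (idiomatic; same O(n) cost).

-- ===== PORT A =====
-- the for-loop with its three flags, the counter and the break, as structural recursion over the same state
def countLoopA : List Char → Bool → Bool → Bool → Int → Int
  | [], _, _, _, number => number
  | ch :: rest, has_a, has_b, has_c, number =>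
    let has_a := has_a || (ch == 'A')
    let has_b := has_b || (ch == 'B')
    let has_c := has_c || (ch == 'C')
    let number := number + 1
    if has_a && has_b && has_c then number
    else countLoopA rest has_a has_b has_c number

def count_number (target_string : String) : Int :=
  countLoopA target_string.toList false false false 0

-- ===== PORT B =====
def count_number_alt (target_string : String) : Int :=
  let a := PySem.Str.find target_string "A"
  let b := PySem.Str.find target_string "B"
  let c := PySem.Str.find target_string "C"
  if a == -1 || b == -1 || c == -1 then PySem.Str.len target_string
  else max (max a b) c + 1

-- ===== PRECONDITION & SPEC =====
def Spec_count_number (target_string : String) (out : Int) : Prop := out = count_number_alt target_string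
instance (target_string : String) (out : Int) : Decidable (Spec_count_number target_string out) := by unfold Spec_count_number; infer_instance

-- ===== CLAIM (what is proved, stated in full; the proofs are below) =====
def Claim_equal_count_number : Prop := ∀ (target_string : String), Dom_count_number target_string → Spec_count_number target_string (count_number target_string)

-- ===== LEMMAS AND PROOFS =====

-- index of the first occurrence of x in l (= l.length when x is absent)
def pvIdx (x : Char) : List Char → Nat
  | [] => 0
  | h :: t => if h == x then 0 else pvIdx x t + 1

def pvComp (f : Bool) (i : Nat) : Nat := if f then 0 else i

-- the number of characters (minus one) A's loop consumes when every still-needed letter occurs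
def pvM (a b c : Bool) (l : List Char) : Nat :=
  max (pvComp a (pvIdx 'A' l)) (max (pvComp b (pvIdx 'B' l)) (pvComp c (pvIdx 'C' l)))

lemma countLoopA_shift (l : List Char) : ∀ (a b c : Bool) (n : Int),
    countLoopA l a b c n = n + countLoopA l a b c 0 := by
  induction l with
  | nil => intro a b c n; simp [countLoopA]
  | cons ch rest ih =>
    intro a b c n
    simp only [countLoopA]
    by_cases h : ((a || (ch == 'A')) && (b || (ch == 'B')) && (c || (ch == 'C'))) = true
    · simp [h]
    · simp only [if_neg h]
      rw [ih _ _ _ (n + 1), ih _ _ _ (0 + 1)]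
      ring

lemma flagcond (f : Bool) (x ch : Char) (rest : List Char) :
    (f || decide (x ∈ ch :: rest)) = ((f || (ch == x)) || decide (x ∈ rest)) := by
  by_cases h : x = ch
  · subst h; simp [List.mem_cons]
  · have hb : (ch == x) = false := by
      rw [beq_eq_false_iff_ne]; exact fun e => h e.symm
    simp [List.mem_cons, h, hb]

lemma pvM_step (a b c : Bool) (ch : Char) (rest : List Char)
    (h : ¬((a || (ch == 'A')) && (b || (ch == 'B')) && (c || (ch == 'C'))) = true) :
    pvM a b c (ch :: rest) = pvM (a || (ch == 'A')) (b || (ch == 'B')) (c || (ch == 'C')) rest + 1 := by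
  simp only [pvM, pvComp, pvIdx]
  rcases a <;> rcases b <;> rcases c <;>
    by_cases hA : (ch == 'A') = true <;> by_cases hB : (ch == 'B') = true <;>
    by_cases hC : (ch == 'C') = true <;>
    simp_all

set_option maxHeartbeats 1000000 in
lemma countLoopA_char : ∀ (l : List Char) (a b c : Bool),
    countLoopA l a b c 0 =
      if ((a || decide ('A' ∈ l)) && (b || decide ('B' ∈ l)) && (c || decide ('C' ∈ l))) = true then
        (if l = [] then 0 else ((pvM a b c l : Int) + 1))
      else (l.length : Int) := by
  intro l
  induction l with
  | nil => intro a b c; rcases a <;> rcases b <;> rcases c <;> simp [countLoopA]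
  | cons ch rest ih =>
    intro a b c
    simp only [countLoopA]
    rw [flagcond a 'A' ch rest, flagcond b 'B' ch rest, flagcond c 'C' ch rest]
    by_cases hall : ((a || (ch == 'A')) && (b || (ch == 'B')) && (c || (ch == 'C'))) = true
    · -- the loop breaks on this character
      clear ih
      have h123 := hall
      rw [Bool.and_eq_true, Bool.and_eq_true] at h123
      obtain ⟨⟨h1, h2⟩, h3⟩ := h123
      have hM : pvM a b c (ch :: rest) = 0 := by
        rw [Bool.or_eq_true] at h1 h2 h3
        rcases h1 with h1 | h1 <;> rcases h2 with h2 | h2 <;> rcases h3 with h3 | h3 <;>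
          simp_all [pvM, pvComp, pvIdx]
      simp [h1, h2, h3, hM]
    · simp only [if_neg hall]
      rw [countLoopA_shift, ih]
      by_cases hc : (((a || (ch == 'A')) || decide ('A' ∈ rest)) &&
          ((b || (ch == 'B')) || decide ('B' ∈ rest)) &&
          ((c || (ch == 'C')) || decide ('C' ∈ rest))) = true
      · -- every needed letter still occurs later
        have hrest : rest ≠ [] := by
          intro hnil; subst hnil
          simp at hc
          apply hall
          simp
          tauto
        rw [if_pos hc, if_pos hc, if_neg hrest,
          if_neg (show ¬(ch :: rest = []) by simp), pvM_step a b c ch rest hall]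
        push_cast
        omega
      · rw [if_neg hc, if_neg hc]
        simp only [List.length_cons]
        push_cast
        omega

lemma findgo_single (x : Char) : ∀ (l : List Char) (k : Nat),
    PySem.Chars.find.go [x] l k =
      if x ∈ l then (((k + pvIdx x l : Nat) : Int)) else -1 := by
  intro l
  induction l with
  | nil => intro k; simp [PySem.Chars.find.go]
  | cons h t ih =>
    intro k
    by_cases hx : (h == x) = true
    · have hx' : (x == h) = true := by
        rw [beq_iff_eq] at hx ⊢; exact hx.symm
      have hm : x ∈ h :: t := by
        rw [beq_iff_eq] at hx; exact hx ▸ List.mem_cons_self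
      simp [PySem.Chars.find.go, List.isPrefixOf, hx, hx', hm, pvIdx]
    · have hx0 : (h == x) = false := by
        rcases Bool.eq_false_or_eq_true (h == x) with h' | h'
        · exact absurd h' hx
        · exact h'
      have hx' : (x == h) = false := by
        rw [beq_eq_false_iff_ne] at hx0 ⊢; exact fun e => hx0 e.symm
      have hne : ¬(x = h) := by rw [beq_eq_false_iff_ne] at hx'; exact hx'
      simp only [PySem.Chars.find.go, List.isPrefixOf, hx', Bool.false_and,
        Bool.false_eq_true, if_false]
      rw [ih (k + 1)]
      simp only [List.mem_cons, pvIdx, hx0, Bool.false_eq_true, if_false]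
      by_cases hmem : x ∈ t
      · simp only [if_pos hmem, if_pos (Or.inr hmem)]
        push_cast
        omega
      · have : ¬(x = h ∨ x ∈ t) := by intro h'; rcases h' with h' | h' <;> [exact hne h'; exact hmem h']
        simp [hmem, hne]

lemma find_single (l : List Char) (x : Char) :
    PySem.Chars.find l [x] = if x ∈ l then ((pvIdx x l : Nat) : Int) else -1 := by
  rw [PySem.Chars.find, findgo_single]
  simp

-- ===== VERDICT (by name: the statement is the Claim_ definition above) =====
theorem count_number_spec : Claim_equal_count_number := by
  intro s _
  unfold Spec_count_number count_number count_number_alt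
  have eA : ("A" : String).toList = ['A'] := by decide
  have eB : ("B" : String).toList = ['B'] := by decide
  have eC : ("C" : String).toList = ['C'] := by decide
  have fA : PySem.Str.find s "A" = PySem.Chars.find s.toList ['A'] := by
    simp [PySem.Str.find, eA]
  have fB : PySem.Str.find s "B" = PySem.Chars.find s.toList ['B'] := by
    simp [PySem.Str.find, eB]
  have fC : PySem.Str.find s "C" = PySem.Chars.find s.toList ['C'] := by
    simp [PySem.Str.find, eC]
  have FA : PySem.Str.find s "A" = (if 'A' ∈ s.toList then ((pvIdx 'A' s.toList : Nat) : Int) else -1) := by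
    rw [fA, find_single]
  have FB : PySem.Str.find s "B" = (if 'B' ∈ s.toList then ((pvIdx 'B' s.toList : Nat) : Int) else -1) := by
    rw [fB, find_single]
  have FC : PySem.Str.find s "C" = (if 'C' ∈ s.toList then ((pvIdx 'C' s.toList : Nat) : Int) else -1) := by
    rw [fC, find_single]
  have elen : PySem.Str.len s = ((s.toList.length : Nat) : Int) := by
    simp [PySem.Str.len]
  rw [countLoopA_char]
  simp only [FA, FB, FC, elen]
  by_cases hmA : 'A' ∈ s.toList <;> by_cases hmB : 'B' ∈ s.toList <;> by_cases hmC : 'C' ∈ s.toList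
  · -- all three letters present
    have hne : s.toList ≠ [] := by intro h; rw [h] at hmA; simp at hmA
    have gA : ¬(((pvIdx 'A' s.toList : Nat) : Int) = -1) := by omega
    have gB : ¬(((pvIdx 'B' s.toList : Nat) : Int) = -1) := by omega
    have gC : ¬(((pvIdx 'C' s.toList : Nat) : Int) = -1) := by omega
    simp [hmA, hmB, hmC, hne, gA, gB, gC, pvM, pvComp]
  all_goals simp [hmA, hmB, hmC]
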